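-- pv_equiv track=rewrite | github.com/manjari-0910/CP-Problems | 05-pascaltrianglevalue-Python/pascaltrianglevalue.py | fun_pascaltrianglevalue
-- ===== SOURCE A (Python) =====
-- def fun_pascaltrianglevalue(row, col):
-- 	li=[[1],[1,1]]
-- 	for i in range (2,row+1):
-- 		li2=[]
-- 		li2.append(li[-1][0])
-- 		for j in range(len(li[-1])-1):
-- 			li2.append(li[-1][j]+li[-1][j+1])
-- 		li2.append(li[-1][-1])
-- 		li.append(li2)
-- 	try:
-- 		return li[row][col]
-- 	except:
-- 		return 0
-- ===== SOURCE B (Python) =====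
-- def fun_pascaltrianglevalue(row, col):
--     if col < 0 or row < col:
--         return 0
--     value = 1
--     for k in range(col):
--         value = value * (row - k) // (k + 1)
--     return value
-- ===== Notes on version B (the rewrite author's own statement) =====
-- stated objective: faster
-- what changed: B drops A's additive row-by-row DP that materialises the whole triangle and computes the single binomial coefficient C(row,col) with a falling-factorial product, returning 0 outside the triangle.
-- intended difference: On negative row or col indices that fall within Python's negative-index window (row >= 0 with -(row+1) <= col < 0, or row in {-1,-2} with col inside the two seed rows), A's list indexing silently wraps around and returns a Pascal value from the end of a row; B returns 0 because such positions lie outside the triangle, which is the intended answer for a triangle-value query. — e.g. on fun_pascaltrianglevalue(2, -1): A returns 1, B returns 0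
import Mathlib
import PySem

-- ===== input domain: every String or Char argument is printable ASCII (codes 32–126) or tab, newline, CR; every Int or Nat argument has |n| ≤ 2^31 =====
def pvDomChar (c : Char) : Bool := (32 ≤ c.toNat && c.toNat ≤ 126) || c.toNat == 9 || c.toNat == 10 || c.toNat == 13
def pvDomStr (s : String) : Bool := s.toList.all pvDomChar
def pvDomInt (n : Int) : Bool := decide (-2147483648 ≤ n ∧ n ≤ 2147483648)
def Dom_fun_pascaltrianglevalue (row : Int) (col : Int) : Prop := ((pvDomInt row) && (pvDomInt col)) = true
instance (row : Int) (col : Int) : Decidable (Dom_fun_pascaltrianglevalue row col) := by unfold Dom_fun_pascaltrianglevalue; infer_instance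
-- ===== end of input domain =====

-- B replaces A's additive row-by-row DP over the whole triangle with a direct
-- falling-factorial product for the single binomial coefficient (faster in a timing run);
-- on Python negative-index positions (see D_) B returns 0 where A wraps around.

-- ===== PORT A =====
-- one iteration of A's outer loop: append the next Pascal row built from li[-1]
def pvStep (li : List (List Int)) (_i : Int) : List (List Int) :=
  let last := PySem.List.pyGetD li (-1) []
  let li2 : List Int := [PySem.List.pyGetD last 0 0]
  let li2 := (PySem.List.pyRange 0 (PySem.List.len last - 1) 1).foldl
      (fun l2 j => l2 ++ [PySem.List.pyGetD last j 0 + PySem.List.pyGetD last (j + 1) 0]) li2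
  let li2 := li2 ++ [PySem.List.pyGetD last (-1) 0]
  li ++ [li2]

def fun_pascaltrianglevalue (row : Int) (col : Int) : Int :=
  let li := (PySem.List.pyRange 2 (row + 1) 1).foldl pvStep [[1], [1, 1]]
  -- try: return li[row][col]  except: return 0   (an IndexError in either lookup yields 0)
  ((PySem.List.pyGet? li row).bind (fun r => PySem.List.pyGet? r col)).getD 0

-- ===== PORT B =====
def fun_pascaltrianglevalue_alt (row : Int) (col : Int) : Int :=
  if col < 0 ∨ row < col then 0
  else
    (PySem.List.pyRange 0 col 1).foldl
      (fun value k => PySem.Int.floordiv (value * (row - k)) (k + 1)) 1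

-- ===== PRECONDITION & SPEC =====
-- On negative indices inside Python's wraparound window (row ≥ 0 with -(row+1) ≤ col < 0, or
-- row ∈ {-1,-2} with col indexing into the two seed rows) A's list indexing silently wraps and
-- returns a Pascal value from the end of a row; B returns 0 since those positions lie outside
-- the triangle, the intended answer for a triangle-value query.
def D_fun_pascaltrianglevalue (row : Int) (col : Int) : Prop :=
  (0 ≤ row ∧ -(row + 1) ≤ col ∧ col < 0) ∨
  (row = -1 ∧ -2 ≤ col ∧ col ≤ 1) ∨
  (row = -2 ∧ -1 ≤ col ∧ col ≤ 0)
instance (row : Int) (col : Int) : Decidable (D_fun_pascaltrianglevalue row col) := by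
  unfold D_fun_pascaltrianglevalue; infer_instance

def Spec_fun_pascaltrianglevalue (row : Int) (col : Int) (out : Int) : Prop :=
  ¬ D_fun_pascaltrianglevalue row col → out = fun_pascaltrianglevalue_alt row col
instance (row : Int) (col : Int) (out : Int) : Decidable (Spec_fun_pascaltrianglevalue row col out) := by
  unfold Spec_fun_pascaltrianglevalue; infer_instance

def pvDiffWitness_fun_pascaltrianglevalue : Int × Int := (2, -1)
def pvDiffWitnessOut_fun_pascaltrianglevalue : Int × Int := (1, 0)

-- ===== CLAIM (what is proved, stated in full; the proofs are below) =====
def Claim_unchanged_fun_pascaltrianglevalue : Prop := ∀ (row : Int) (col : Int), Dom_fun_pascaltrianglevalue row col → Spec_fun_pascaltrianglevalue row col (fun_pascaltrianglevalue row col)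
def Claim_changed_fun_pascaltrianglevalue : Prop := Dom_fun_pascaltrianglevalue (pvDiffWitness_fun_pascaltrianglevalue.1) (pvDiffWitness_fun_pascaltrianglevalue.2) ∧ D_fun_pascaltrianglevalue (pvDiffWitness_fun_pascaltrianglevalue.1) (pvDiffWitness_fun_pascaltrianglevalue.2) ∧ fun_pascaltrianglevalue (pvDiffWitness_fun_pascaltrianglevalue.1) (pvDiffWitness_fun_pascaltrianglevalue.2) = pvDiffWitnessOut_fun_pascaltrianglevalue.1 ∧ fun_pascaltrianglevalue_alt (pvDiffWitness_fun_pascaltrianglevalue.1) (pvDiffWitness_fun_pascaltrianglevalue.2) = pvDiffWitnessOut_fun_pascaltrianglevalue.2 ∧ pvDiffWitnessOut_fun_pascaltrianglevalue.1 ≠ pvDiffWitnessOut_fun_pascaltrianglevalue.2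
def Claim_exact_fun_pascaltrianglevalue : Prop := ∀ (row : Int) (col : Int), Dom_fun_pascaltrianglevalue row col → D_fun_pascaltrianglevalue row col → fun_pascaltrianglevalue row col ≠ fun_pascaltrianglevalue_alt row col

-- ===== LEMMAS AND PROOFS =====

-- row n of Pascal's triangle, and the triangle's first L rows
def binomRow (n : Nat) : List Int := (List.range (n + 1)).map (fun k => (n.choose k : Int))
def pascal (L : Nat) : List (List Int) := (List.range L).map binomRow

theorem pyGet?_map_range_cases {α : Type} (f : Nat → α) (L : Nat) (i : Int) :
    PySem.List.pyGet? ((List.range L).map f) i =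
      (if 0 ≤ i ∧ i < (L:Int) then some (f i.toNat)
       else if -(L:Int) ≤ i ∧ i < 0 then some (f (i + L).toNat)
       else none) := by
  simp only [PySem.List.pyGet?, PySem.List.pyIdx?, List.length_map, List.length_range]
  split_ifs with h1 h2 h3 h4 h5 h6 h7 <;> simp_all [List.getElem?_map] <;> try omega
  refine ⟨L - (-i).toNat, List.getElem?_range (by omega), ?_⟩
  congr 1; omega

theorem binomRow_succ (n : Nat) :
    binomRow (n + 1) =
      [(1 : Int)] ++ (List.range n).map
        (fun k => ((n.choose k : Int) + (n.choose (k + 1) : Int))) ++ [1] := by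
  unfold binomRow
  rw [List.range_succ_eq_map, List.range_succ, List.map_cons, List.map_map, List.map_append]
  simp [Nat.choose_succ_succ, Function.comp]

theorem pascal_succ (L : Nat) : pascal (L + 1) = pascal L ++ [binomRow L] := by
  unfold pascal; rw [List.range_succ, List.map_append]; rfl

theorem pvStep_pascal (n : Nat) (i : Int) : pvStep (pascal (n + 1)) i = pascal (n + 2) := by
  have hlast : PySem.List.pyGetD (pascal (n + 1)) (-1) [] = binomRow n := by
    rw [pascal_succ, PySem.List.pyGetD_neg_one_append_singleton]
  have hlen : PySem.List.len (binomRow n) - 1 = (n : Int) := by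
    simp [binomRow, PySem.List.len_eq]
  have hfirst : PySem.List.pyGetD (binomRow n) 0 0 = 1 := by
    simp [binomRow, PySem.List.pyGetD_zero, List.range_succ_eq_map]
  have hsplit : binomRow n = (List.range n).map (fun k => (n.choose k : Int)) ++ [(n.choose n : Int)] := by
    unfold binomRow; rw [List.range_succ, List.map_append]; rfl
  have hlastel : PySem.List.pyGetD (binomRow n) (-1) 0 = 1 := by
    rw [hsplit, PySem.List.pyGetD_neg_one_append_singleton, Nat.choose_self]; rfl
  have hmap : ∀ k ∈ List.range n,
      PySem.List.pyGetD (binomRow n) ((k : Nat) : Int) 0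
        + PySem.List.pyGetD (binomRow n) (((k : Nat) : Int) + 1) 0
      = (n.choose k : Int) + (n.choose (k + 1) : Int) := by
    intro k hk
    rw [List.mem_range] at hk
    have h1 : ((k : Int) + 1) = ((k + 1 : Nat) : Int) := by push_cast; ring
    simp only [h1, PySem.List.pyGetD_natCast, binomRow]
    rw [List.getD_eq_getElem?_getD, List.getD_eq_getElem?_getD,
        List.getElem?_map, List.getElem?_map,
        List.getElem?_range (by omega : k < n + 1),
        List.getElem?_range (by omega : k + 1 < n + 1)]
    rfl
  simp only [pvStep, hlast, hlen, hfirst, hlastel, PySem.List.pyRange_zero_nat,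
    PySem.List.foldl_append_singleton_eq_map, List.map_map]
  rw [show ((fun j => PySem.List.pyGetD (binomRow n) j 0 + PySem.List.pyGetD (binomRow n) (j + 1) 0)
        ∘ fun k : Nat => (k : Int))
      = fun k : Nat => PySem.List.pyGetD (binomRow n) ((k : Nat) : Int) 0
          + PySem.List.pyGetD (binomRow n) (((k : Nat) : Int) + 1) 0 from rfl,
    List.map_congr_left hmap]
  rw [← binomRow_succ n, ← pascal_succ]

theorem pascal_foldl (t : Nat) :
    (PySem.List.pyRange 2 (2 + (t : Int)) 1).foldl pvStep [[1], [1, 1]] = pascal (2 + t) := by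
  induction t with
  | zero =>
    rw [show ((2 : Int) + ((0 : Nat) : Int)) = 2 by norm_num, PySem.List.pyRange_one_eq_nil le_rfl]
    decide
  | succ t ih =>
    have h1 : ((2 : Int) + ((t + 1 : Nat) : Int)) = (2 + (t : Int)) + 1 := by push_cast; ring
    rw [h1, PySem.List.pyRange_one_succ_right (by omega), List.foldl_append, ih]
    simp only [List.foldl_cons, List.foldl_nil]
    have := pvStep_pascal (t + 1) (2 + (t : Int))
    rw [show t + 1 + 1 = 2 + t by omega, show t + 1 + 2 = 2 + (t + 1) by omega] at this
    exact this

theorem li_eq (row : Int) :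
    (PySem.List.pyRange 2 (row + 1) 1).foldl pvStep [[1], [1, 1]] =
      pascal (if row + 1 > 2 then (row + 1).toNat else 2) := by
  by_cases h : row + 1 > 2
  · have ht : row + 1 = 2 + (((row - 1).toNat : Nat) : Int) := by omega
    have hn : (row + 1).toNat = 2 + (row - 1).toNat := by omega
    rw [if_pos h, hn, ← pascal_foldl, ← ht]
  · rw [PySem.List.pyRange_one_eq_nil (by omega), if_neg h]
    simp only [List.foldl_nil]
    decide

theorem binomLoop (row : Int) (c : Nat) (h : (c : Int) ≤ row) :
    (PySem.List.pyRange 0 (c : Int) 1).foldl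
      (fun value k => PySem.Int.floordiv (value * (row - k)) (k + 1)) 1
    = (row.toNat.choose c : Int) := by
  induction c with
  | zero => simp [PySem.List.pyRange_one_eq_nil]
  | succ c ih =>
    have h1 : ((c + 1 : Nat) : Int) = (c : Int) + 1 := by push_cast; ring
    rw [h1, PySem.List.pyRange_one_succ_right (by positivity), List.foldl_append,
        ih (by omega)]
    simp only [List.foldl_cons, List.foldl_nil]
    have hr : row = ((row.toNat : Nat) : Int) := by omega
    have hsub : (row - (c : Int)) = ((row.toNat - c : Nat) : Int) := by
      push_cast [Nat.cast_sub (by omega : c ≤ row.toNat)]; omega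
    rw [hsub, ← Nat.cast_mul, ← Nat.choose_succ_right_eq row.toNat c, h1.symm,
        PySem.Int.floordiv_natCast, Nat.mul_div_cancel _ (by omega : 0 < c + 1)]

-- A's col-lookup inside a single Pascal row, with Python index resolution
theorem inner_row (n : Nat) (col : Int) :
    (PySem.List.pyGet? (binomRow n) col).getD 0 =
      (if 0 ≤ col ∧ col ≤ (n : Int) then (n.choose col.toNat : Int)
       else if -((n : Int) + 1) ≤ col ∧ col < 0 then (n.choose (col + n + 1).toNat : Int)
       else 0) := by
  unfold binomRow
  rw [pyGet?_map_range_cases]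
  have hcast : (((n + 1 : Nat) : Int)) = (n : Int) + 1 := by push_cast; ring
  rw [hcast]
  by_cases h1 : 0 ≤ col ∧ col ≤ (n : Int)
  · rw [if_pos (by omega), if_pos h1, Option.getD_some]
  · rw [if_neg (by omega), if_neg h1]
    by_cases h2 : -((n : Int) + 1) ≤ col ∧ col < 0
    · rw [if_pos (by omega), if_pos h2, Option.getD_some]
      have : (col + ((n : Int) + 1)).toNat = (col + n + 1).toNat := by omega
      rw [this]
    · rw [if_neg (by omega), if_neg h2, Option.getD_none]

-- A's value: full case analysis of li[row][col] against the Pascal triangle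
theorem A_eq (row col : Int) :
    fun_pascaltrianglevalue row col =
      (if 0 ≤ row then
        (if 0 ≤ col ∧ col ≤ row then (row.toNat.choose col.toNat : Int)
         else if -(row + 1) ≤ col ∧ col < 0 then (row.toNat.choose (col + row + 1).toNat : Int)
         else 0)
       else if -2 ≤ row then
        (if 0 ≤ col ∧ col ≤ row + 2 then ((row + 2).toNat.choose col.toNat : Int)
         else if -((row + 2) + 1) ≤ col ∧ col < 0 then
           ((row + 2).toNat.choose (col + (row + 2) + 1).toNat : Int)
         else 0)
       else 0) := by
  show ((PySem.List.pyGet? ((PySem.List.pyRange 2 (row + 1) 1).foldl pvStep [[1], [1, 1]]) row).bind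
      (fun r => PySem.List.pyGet? r col)).getD 0 = _
  rw [li_eq]
  simp only [pascal]
  rw [pyGet?_map_range_cases]
  have hLInt : ((if row + 1 > 2 then (row + 1).toNat else 2 : Nat) : Int)
      = (if row + 1 > 2 then row + 1 else 2) := by split_ifs <;> omega
  rw [hLInt]
  by_cases h0 : 0 ≤ row
  · rw [if_pos ⟨h0, by split_ifs <;> omega⟩, if_pos h0, Option.bind_some, inner_row]
    have hrn : ((row.toNat : Nat) : Int) = row := by omega
    rw [hrn]
  · have hL2 : (if row + 1 > 2 then row + 1 else 2) = (2 : Int) := by rw [if_neg (by omega)]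
    rw [hL2, if_neg h0]
    by_cases h2 : -2 ≤ row
    · rw [if_neg (by omega), if_pos ⟨by omega, by omega⟩, if_pos h2, Option.bind_some, inner_row]
      have hrn : (((row + 2).toNat : Nat) : Int) = row + 2 := by omega
      rw [hrn]
    · rw [if_neg (by omega), if_neg (by omega), if_neg h2, Option.bind_none, Option.getD_none]

-- B's value: C(row,col) inside the triangle, 0 outside
theorem B_eq (row col : Int) :
    fun_pascaltrianglevalue_alt row col =
      (if 0 ≤ col ∧ col ≤ row then (row.toNat.choose col.toNat : Int) else 0) := by
  unfold fun_pascaltrianglevalue_alt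
  by_cases h : 0 ≤ col ∧ col ≤ row
  · rw [if_neg (by omega), if_pos h]
    have hc : col = ((col.toNat : Nat) : Int) := by omega
    rw [hc, binomLoop row col.toNat (by omega), Int.toNat_natCast]
  · rw [if_pos (by omega), if_neg h]

-- ===== VERDICT (by name: the statements are the Claim_ definitions above) =====
theorem fun_pascaltrianglevalue_spec : Claim_unchanged_fun_pascaltrianglevalue := by
  intro row col _ hD
  unfold D_fun_pascaltrianglevalue at hD
  show fun_pascaltrianglevalue row col = fun_pascaltrianglevalue_alt row col
  rw [A_eq, B_eq]
  by_cases h0 : 0 ≤ row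
  · rw [if_pos h0]
    by_cases h1 : 0 ≤ col ∧ col ≤ row
    · rw [if_pos h1, if_pos h1]
    · rw [if_neg h1, if_neg h1, if_neg (show ¬(-(row + 1) ≤ col ∧ col < 0) by omega)]
  · rw [if_neg h0]
    by_cases h2 : -2 ≤ row
    · rw [if_pos h2, if_neg (by omega), if_neg (by omega), if_neg (by omega)]
    · rw [if_neg h2, if_neg (show ¬(0 ≤ col ∧ col ≤ row) by omega)]

theorem fun_pascaltrianglevalue_changed : Claim_changed_fun_pascaltrianglevalue := by
  unfold Claim_changed_fun_pascaltrianglevalue; decide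

theorem fun_pascaltrianglevalue_tight : Claim_exact_fun_pascaltrianglevalue := by
  intro row col _ hD
  unfold D_fun_pascaltrianglevalue at hD
  rw [A_eq, B_eq]
  rcases hD with ⟨h0, hc1, hc2⟩ | ⟨h0, hc1, hc2⟩ | ⟨h0, hc1, hc2⟩
  · rw [if_pos h0, if_neg (show ¬(0 ≤ col ∧ col ≤ row) by omega), if_pos ⟨hc1, hc2⟩,
        if_neg (show ¬(0 ≤ col ∧ col ≤ row) by omega)]
    have hle : (col + row + 1).toNat ≤ row.toNat := by omega
    exact Int.natCast_ne_zero.mpr (Nat.choose_pos hle).ne'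
  · subst h0
    rw [if_neg (by omega), if_pos (by omega)]
    by_cases hc : 0 ≤ col
    · rw [if_pos ⟨hc, by omega⟩, if_neg (show ¬(0 ≤ col ∧ col ≤ (-1 : Int)) by omega)]
      have hle : col.toNat ≤ ((-1 : Int) + 2).toNat := by omega
      exact Int.natCast_ne_zero.mpr (Nat.choose_pos hle).ne'
    · rw [if_neg (by omega), if_pos (by omega),
          if_neg (show ¬(0 ≤ col ∧ col ≤ (-1 : Int)) by omega)]
      have hle : (col + ((-1 : Int) + 2) + 1).toNat ≤ ((-1 : Int) + 2).toNat := by omega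
      exact Int.natCast_ne_zero.mpr (Nat.choose_pos hle).ne'
  · subst h0
    rw [if_neg (by omega), if_pos (by omega)]
    by_cases hc : 0 ≤ col
    · rw [if_pos ⟨hc, by omega⟩, if_neg (show ¬(0 ≤ col ∧ col ≤ (-2 : Int)) by omega)]
      have hle : col.toNat ≤ ((-2 : Int) + 2).toNat := by omega
      exact Int.natCast_ne_zero.mpr (Nat.choose_pos hle).ne'
    · rw [if_neg (by omega), if_pos (by omega),
          if_neg (show ¬(0 ≤ col ∧ col ≤ (-2 : Int)) by omega)]
      have hle : (col + ((-2 : Int) + 2) + 1).toNat ≤ ((-2 : Int) + 2).toNat := by omega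
      exact Int.natCast_ne_zero.mpr (Nat.choose_pos hle).ne'
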